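-- pv_equiv track=rewrite | github.com/ecn42/relatorio-comissoes | pages/15_factsheet.py | _resolve_date_col
-- ===== SOURCE A (Python) =====
-- from typing import Dict, List, Optional, Tuple
--
-- def _resolve_date_col(cols: List[str]) -> Optional[str]:
--     cand = ["date", "dt", "data", "refdate", "ref_date"]
--     for c in cand:
--         for col in cols:
--             if col.lower() == c:
--                 return col
--     for c in cand:
--         for col in cols:
--             if c in col.lower():
--                 return col
--     return None
-- ===== SOURCE B (Python) =====
-- def _first_index(pred, items):
--     for i, x in enumerate(items):
--         if pred(x):
--             return i
--     return None
--
-- def _resolve_date_col(cols):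
--     cand = ["date", "dt", "data", "refdate", "ref_date"]
--     best_key = None
--     best_col = None
--     for col in cols:
--         low = col.lower()
--         i = _first_index(lambda c: low == c, cand)
--         if i is not None:
--             key = (0, i)
--         else:
--             j = _first_index(lambda c: c in low, cand)
--             key = (1, j) if j is not None else None
--         if key is not None and (best_key is None or key < best_key):
--             best_key = key
--             best_col = col
--     return best_col
-- ===== Notes on version B (the rewrite author's own statement) =====
-- stated objective: alternative
-- what changed: Replaced A's candidate-outer two-phase nested scan (exact pass over all candidates, then substring pass) by a single pass over the columns that ranks each column with a (phase, candidate-index) key and keeps the first column with the lexicographically smallest key.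
import Mathlib
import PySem

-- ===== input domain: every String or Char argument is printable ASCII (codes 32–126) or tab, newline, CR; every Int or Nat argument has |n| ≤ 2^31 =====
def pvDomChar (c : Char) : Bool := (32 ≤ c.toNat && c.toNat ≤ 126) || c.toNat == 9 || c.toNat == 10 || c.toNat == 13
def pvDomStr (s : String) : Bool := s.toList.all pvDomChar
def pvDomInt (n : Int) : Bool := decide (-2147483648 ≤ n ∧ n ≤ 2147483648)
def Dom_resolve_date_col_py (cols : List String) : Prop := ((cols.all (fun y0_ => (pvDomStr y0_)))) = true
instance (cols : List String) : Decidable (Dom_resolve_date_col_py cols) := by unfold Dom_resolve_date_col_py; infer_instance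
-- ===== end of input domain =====

-- B replaces A's candidate-outer two-phase nested scan by a single pass over the columns
-- that ranks each column with a (phase, candidate-index) key and keeps the argmin
-- (alternative decomposition; same return value, no speed claim).

def pvCand : List String := ["date", "dt", "data", "refdate", "ref_date"]

-- ===== PORT A =====
-- 'for c in cand: for col in cols: if col.lower() == c: return col'
def aLoop1 : List String → List String → Option String
  | [], _ => none
  | c :: cs, cols =>
    match cols.find? (fun col => PySem.Str.lower col == c) with
    | some col => some col
    | none => aLoop1 cs cols

-- 'for c in cand: for col in cols: if c in col.lower(): return col'
def aLoop2 : List String → List String → Option String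
  | [], _ => none
  | c :: cs, cols =>
    match cols.find? (fun col => PySem.Str.isIn c (PySem.Str.lower col)) with
    | some col => some col
    | none => aLoop2 cs cols

def resolve_date_col_py (cols : List String) : Option String :=
  match aLoop1 pvCand cols with
  | some col => some col
  | none =>
    match aLoop2 pvCand cols with
    | some col => some col
    | none => none

-- ===== PORT B =====
-- Source B's _first_index(pred, items): first index whose element satisfies pred;
-- List.findIdx? is exactly that loop.
def pvFirstIndex (pred : String → Bool) (items : List String) : Option Nat :=
  List.findIdx? pred items

-- Source B's _key(low, cand): ranking key (phase, candidate index), None if no match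
def bKey (low : String) : Option (Nat × Nat) :=
  match pvFirstIndex (fun c => low == c) pvCand with
  | some i => some (0, i)
  | none =>
    match pvFirstIndex (fun c => PySem.Str.isIn c low) pvCand with
    | some j => some (1, j)
    | none => none

-- Python tuple '<' on the 2-tuples used as keys
def pvLtKey (a b : Nat × Nat) : Bool := a.1 < b.1 || (a.1 == b.1 && a.2 < b.2)

-- the single pass: keep the best (key, column) seen so far; strict '<' keeps the first on ties
def bGo : List String → Option ((Nat × Nat) × String) → Option String
  | [], best => best.map (fun p => p.2)
  | col :: rest, best =>
    let key := bKey (PySem.Str.lower col)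
    let best' :=
      match key, best with
      | none, b => b
      | some k, none => some (k, col)
      | some k, some (bk, bc) => if pvLtKey k bk then some (k, col) else some (bk, bc)
    bGo rest best'

def resolve_date_col_py_alt (cols : List String) : Option String := bGo cols none

-- ===== PRECONDITION & SPEC =====
def Spec_resolve_date_col_py (cols : List String) (out : Option String) : Prop := out = resolve_date_col_py_alt cols
instance (cols : List String) (out : Option String) : Decidable (Spec_resolve_date_col_py cols out) := by unfold Spec_resolve_date_col_py; infer_instance

-- ===== CLAIM (what is proved, stated in full; the proofs are below) =====
def Claim_equal_resolve_date_col_py : Prop := ∀ (cols : List String), Dom_resolve_date_col_py cols → Spec_resolve_date_col_py cols (resolve_date_col_py cols)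

-- ===== LEMMAS AND PROOFS =====

-- key of a column
def pvKof (col : String) : Option (Nat × Nat) := bKey (PySem.Str.lower col)

-- right-fold argmin with the same tie rule (first minimal wins)
def pvAmin : List String → Option ((Nat × Nat) × String)
  | [] => none
  | col :: rest =>
    match pvKof col, pvAmin rest with
    | none, r => r
    | some kc, none => some (kc, col)
    | some kc, some (kr, cr) => if pvLtKey kr kc then some (kr, cr) else some (kc, col)

theorem pvLt_irrefl (a : Nat × Nat) : pvLtKey a a = false := by
  simp [pvLtKey]

theorem pvLt_asymm {a b : Nat × Nat} (h : pvLtKey a b = true) : pvLtKey b a = false := by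
  rcases a with ⟨a1, a2⟩; rcases b with ⟨b1, b2⟩
  simp [pvLtKey] at h ⊢; omega

theorem pvLt_trans {a b c : Nat × Nat} (h1 : pvLtKey a b = true) (h2 : pvLtKey b c = true) :
    pvLtKey a c = true := by
  rcases a with ⟨a1, a2⟩; rcases b with ⟨b1, b2⟩; rcases c with ⟨c1, c2⟩
  simp [pvLtKey] at h1 h2 ⊢; omega

theorem pvLt_not_trans {a b c : Nat × Nat} (h1 : pvLtKey a b = false) (h2 : pvLtKey b c = false) :
    pvLtKey a c = false := by
  rcases a with ⟨a1, a2⟩; rcases b with ⟨b1, b2⟩; rcases c with ⟨c1, c2⟩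
  simp [pvLtKey] at h1 h2 ⊢; omega

theorem bGo_some (cols : List String) (kb : Nat × Nat) (cb : String) :
    bGo cols (some (kb, cb)) =
      some ((match pvAmin cols with
        | none => (kb, cb)
        | some (kr, cr) => if pvLtKey kr kb then (kr, cr) else (kb, cb)).2) := by
  induction cols generalizing kb cb with
  | nil => simp [bGo, pvAmin]
  | cons col rest ih =>
    show bGo rest _ = _
    rcases hk : pvKof col with _ | kc
    · simp only [pvKof] at hk
      simp only [hk]
      rw [ih]
      simp [pvAmin, pvKof, hk]
    · simp only [pvKof] at hk
      simp only [hk]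
      by_cases hlt : pvLtKey kc kb = true
      · simp only [hlt, if_true]
        rw [ih]
        rcases hr : pvAmin rest with _ | ⟨kr, cr⟩
        · simp [pvAmin, pvKof, hk, hr, hlt]
        · simp only [pvAmin, pvKof, hk, hr]
          by_cases h2 : pvLtKey kr kc = true
          · simp [h2, pvLt_trans h2 hlt]
          · simp [h2, hlt]
      · simp only [Bool.not_eq_true] at hlt
        simp only [hlt, Bool.false_eq_true, if_false]
        rw [ih]
        rcases hr : pvAmin rest with _ | ⟨kr, cr⟩
        · simp [pvAmin, pvKof, hk, hr, hlt]
        · simp only [pvAmin, pvKof, hk, hr]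
          by_cases h2 : pvLtKey kr kc = true
          · simp [h2]
          · simp only [Bool.not_eq_true] at h2
            simp [h2, hlt, pvLt_not_trans h2 hlt]

theorem bGo_none (cols : List String) :
    bGo cols none = (pvAmin cols).map (fun p => p.2) := by
  induction cols with
  | nil => simp [bGo, pvAmin]
  | cons col rest ih =>
    show bGo rest _ = _
    rcases hk : pvKof col with _ | kc
    · simp only [pvKof] at hk
      simp only [hk]
      rw [ih]; simp [pvAmin, pvKof, hk]
    · simp only [pvKof] at hk
      simp only [hk]
      rw [bGo_some]
      rcases hr : pvAmin rest with _ | ⟨kr, cr⟩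
      · simp [pvAmin, pvKof, hk, hr]
      · simp only [pvAmin, pvKof, hk, hr]
        by_cases h2 : pvLtKey kr kc = true
        · simp [h2]
        · simp [h2]

theorem alt_eq_amin (cols : List String) :
    resolve_date_col_py_alt cols = (pvAmin cols).map (fun p => p.2) := bGo_none cols

theorem amin_none {cols : List String} (h : pvAmin cols = none) :
    ∀ col ∈ cols, pvKof col = none := by
  induction cols with
  | nil => simp
  | cons col rest ih =>
    intro c hc
    rcases hk : pvKof col with _ | kc
    · rcases List.mem_cons.1 hc with rfl | hmem
      · exact hk
      · apply ih _ _ hmem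
        simpa [pvAmin, hk] using h
    · exfalso
      rcases hr : pvAmin rest with _ | ⟨kr, cr⟩
      · simp [pvAmin, hk, hr] at h
      · simp only [pvAmin, hk, hr] at h
        by_cases h2 : pvLtKey kr kc = true <;> simp [h2] at h

theorem amin_some {cols : List String} {kr : Nat × Nat} {cr : String}
    (h : pvAmin cols = some (kr, cr)) :
    ∃ l1 l2, cols = l1 ++ cr :: l2 ∧ pvKof cr = some kr ∧
      (∀ col ∈ l1, ∀ k, pvKof col = some k → pvLtKey kr k = true) ∧
      (∀ col ∈ l2, ∀ k, pvKof col = some k → pvLtKey k kr = false) := by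
  induction cols generalizing kr cr with
  | nil => simp [pvAmin] at h
  | cons col rest ih =>
    rcases hk : pvKof col with _ | kc
    · have h' : pvAmin rest = some (kr, cr) := by simpa [pvAmin, hk] using h
      obtain ⟨l1, l2, hsplit, hkey, h1, h2⟩ := ih h'
      refine ⟨col :: l1, l2, by simp [hsplit], hkey, ?_, h2⟩
      intro c hc k hkc
      rcases List.mem_cons.1 hc with rfl | hmem
      · rw [hk] at hkc; cases hkc
      · exact h1 c hmem k hkc
    · rcases hr : pvAmin rest with _ | ⟨kr', cr'⟩
      · have : kc = kr ∧ col = cr := by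
          simpa [pvAmin, hk, hr] using h
        obtain ⟨rfl, rfl⟩ := this
        refine ⟨[], rest, rfl, hk, by simp, ?_⟩
        intro c hc k hkc
        have := amin_none hr c hc
        rw [this] at hkc; cases hkc
      · obtain ⟨l1', l2', hsplit', hkey', h1', h2'⟩ := ih hr
        by_cases hlt : pvLtKey kr' kc = true
        · have : kr' = kr ∧ cr' = cr := by
            simpa [pvAmin, hk, hr, hlt] using h
          obtain ⟨rfl, rfl⟩ := this
          refine ⟨col :: l1', l2', by simp [hsplit'], hkey', ?_, h2'⟩
          intro c hc k hkc
          rcases List.mem_cons.1 hc with rfl | hmem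
          · rw [hk] at hkc; cases Option.some.inj hkc; exact hlt
          · exact h1' c hmem k hkc
        · simp only [Bool.not_eq_true] at hlt
          have : kc = kr ∧ col = cr := by
            simpa [pvAmin, hk, hr, hlt] using h
          obtain ⟨rfl, rfl⟩ := this
          refine ⟨[], rest, rfl, hk, by simp, ?_⟩
          intro c hc k hkc
          rw [hsplit'] at hc
          rcases List.mem_append.1 hc with hm1 | hm2
          · have := h1' c hm1 k hkc
            exact pvLt_not_trans (pvLt_asymm this) hlt
          · rcases List.mem_cons.1 hm2 with rfl | hm2'
            · rw [hkey'] at hkc; cases Option.some.inj hkc; exact hlt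
            · exact pvLt_not_trans (h2' c hm2' k hkc) hlt

-- pvKof case analysis
theorem kof_none_exact {col c : String} (h : pvKof col = none) (hc : c ∈ pvCand) :
    (PySem.Str.lower col == c) = false := by
  simp only [pvKof, bKey, pvFirstIndex] at h
  rcases he : List.findIdx? (fun c => PySem.Str.lower col == c) pvCand with _ | i
  · exact List.findIdx?_eq_none_iff.1 he c hc
  · rw [he] at h; cases h

theorem kof_none_sub {col c : String} (h : pvKof col = none) (hc : c ∈ pvCand) :
    PySem.Str.isIn c (PySem.Str.lower col) = false := by
  simp only [pvKof, bKey, pvFirstIndex] at h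
  rcases he : List.findIdx? (fun c => PySem.Str.lower col == c) pvCand with _ | i
  · rw [he] at h
    rcases hs : List.findIdx? (fun c => PySem.Str.isIn c (PySem.Str.lower col)) pvCand with _ | j
    · exact List.findIdx?_eq_none_iff.1 hs c hc
    · rw [hs] at h; cases h
  · rw [he] at h; cases h

theorem kof_some_cases {col : String} {k : Nat × Nat} (h : pvKof col = some k) :
    (k.1 = 0 ∧ List.findIdx? (fun c => PySem.Str.lower col == c) pvCand = some k.2) ∨
    (k.1 = 1 ∧ List.findIdx? (fun c => PySem.Str.lower col == c) pvCand = none ∧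
      List.findIdx? (fun c => PySem.Str.isIn c (PySem.Str.lower col)) pvCand = some k.2) := by
  simp only [pvKof, bKey, pvFirstIndex] at h
  rcases he : List.findIdx? (fun c => PySem.Str.lower col == c) pvCand with _ | i
  · rw [he] at h
    rcases hs : List.findIdx? (fun c => PySem.Str.isIn c (PySem.Str.lower col)) pvCand with _ | j
    · rw [hs] at h; cases h
    · rw [hs] at h
      replace h := (Option.some.inj h).symm
      subst h
      exact Or.inr ⟨rfl, rfl, rfl⟩
  · rw [he] at h
    replace h := (Option.some.inj h).symm
    subst h
    exact Or.inl ⟨rfl, rfl⟩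

theorem kof_of_exact {col : String} {i : Nat}
    (h : List.findIdx? (fun c => PySem.Str.lower col == c) pvCand = some i) :
    pvKof col = some (0, i) := by
  simp only [pvKof, bKey, pvFirstIndex]
  rw [h]

theorem kof_of_sub {col : String} {j : Nat}
    (he : List.findIdx? (fun c => PySem.Str.lower col == c) pvCand = none)
    (hs : List.findIdx? (fun c => PySem.Str.isIn c (PySem.Str.lower col)) pvCand = some j) :
    pvKof col = some (1, j) := by
  simp only [pvKof, bKey, pvFirstIndex]
  rw [he, hs]

theorem pvCand_nodup : pvCand.Nodup := by decide

-- exact match determines the candidate index (candidates are distinct)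
theorem exact_findIdx_of_eq {low : String} {j : Nat} (hj : j < pvCand.length)
    (h : low = pvCand[j]) :
    List.findIdx? (fun c => low == c) pvCand = some j := by
  rw [List.findIdx?_eq_some_iff_getElem]
  refine ⟨hj, by simp [h], ?_⟩
  intro j' hj'
  simp only [Bool.not_eq_true, beq_eq_false_iff_ne, ne_eq, h]
  intro heq
  have := (List.Nodup.getElem_inj_iff pvCand_nodup).1 heq
  omega

-- a true predicate instance bounds the first index from above
theorem findIdx_le_of_true {p : String → Bool} {xs : List String} {j : Nat}
    (hj : j < xs.length) (h : p xs[j] = true) :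
    ∃ i, i ≤ j ∧ List.findIdx? p xs = some i := by
  rcases he : List.findIdx? p xs with _ | i
  · exfalso
    have := List.findIdx?_eq_none_iff.1 he xs[j] (List.getElem_mem hj)
    rw [h] at this; cases this
  · obtain ⟨hi, _, hmin⟩ := List.findIdx?_eq_some_iff_getElem.1 he
    refine ⟨i, ?_, rfl⟩
    by_contra hcon
    exact hmin j (by omega) h

-- A-side: the nested loops return none when nothing matches
theorem aLoop1_none {cs cols : List String}
    (h : ∀ c ∈ cs, ∀ col ∈ cols, (PySem.Str.lower col == c) = false) :
    aLoop1 cs cols = none := by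
  induction cs with
  | nil => rfl
  | cons c cs' ih =>
    have hfind : cols.find? (fun col => PySem.Str.lower col == c) = none :=
      List.find?_eq_none.2 (fun col hcol => by simp [h c (by simp) col hcol])
    simp only [aLoop1, hfind]
    exact ih (fun c' hc' => h c' (by simp [hc']))

theorem aLoop2_none {cs cols : List String}
    (h : ∀ c ∈ cs, ∀ col ∈ cols, PySem.Str.isIn c (PySem.Str.lower col) = false) :
    aLoop2 cs cols = none := by
  induction cs with
  | nil => rfl
  | cons c cs' ih =>
    have hfind : cols.find? (fun col => PySem.Str.isIn c (PySem.Str.lower col)) = none :=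
      List.find?_eq_none.2 (fun col hcol => by simpa using h c (by simp) col hcol)
    simp only [aLoop2, hfind]
    exact ih (fun c' hc' => h c' (by simp [hc']))

-- A-side: first candidate index with a hit decides the result
theorem aLoop1_first : ∀ (cs cols : List String) (i : Nat) (cr : String) (hi : i < cs.length),
    (∀ j (hj : j < i), cols.find? (fun col => PySem.Str.lower col == cs[j]'(by omega)) = none) →
    cols.find? (fun col => PySem.Str.lower col == cs[i]) = some cr →
    aLoop1 cs cols = some cr := by
  intro cs
  induction cs with
  | nil => intro cols i cr hi; simp at hi
  | cons c cs' ih =>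
    intro cols i cr hi hnone hfind
    cases i with
    | zero => simp only [aLoop1]; rw [show (c :: cs')[0] = c from rfl] at hfind; rw [hfind]
    | succ i' =>
      have h0 := hnone 0 (by omega)
      rw [show (c :: cs')[0]'(by omega) = c from rfl] at h0
      simp only [aLoop1, h0]
      exact ih cols i' cr (by simpa using hi)
        (fun j hj => hnone (j + 1) (by omega)) hfind

theorem aLoop2_first : ∀ (cs cols : List String) (i : Nat) (cr : String) (hi : i < cs.length),
    (∀ j (hj : j < i), cols.find? (fun col => PySem.Str.isIn (cs[j]'(by omega)) (PySem.Str.lower col)) = none) →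
    cols.find? (fun col => PySem.Str.isIn cs[i] (PySem.Str.lower col)) = some cr →
    aLoop2 cs cols = some cr := by
  intro cs
  induction cs with
  | nil => intro cols i cr hi; simp at hi
  | cons c cs' ih =>
    intro cols i cr hi hnone hfind
    cases i with
    | zero => simp only [aLoop2]; rw [show (c :: cs')[0] = c from rfl] at hfind; rw [hfind]
    | succ i' =>
      have h0 := hnone 0 (by omega)
      rw [show (c :: cs')[0]'(by omega) = c from rfl] at h0
      simp only [aLoop2, h0]
      exact ih cols i' cr (by simpa using hi)
        (fun j hj => hnone (j + 1) (by omega)) hfind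

-- main: port A equals the argmin
set_option maxHeartbeats 1000000 in
theorem A_eq_amin (cols : List String) :
    resolve_date_col_py cols = (pvAmin cols).map (fun p => p.2) := by
  rcases h : pvAmin cols with _ | ⟨kr, cr⟩
  · have hall := amin_none h
    have h1 : aLoop1 pvCand cols = none :=
      aLoop1_none (fun c hc col hcol => kof_none_exact (hall col hcol) hc)
    have h2 : aLoop2 pvCand cols = none :=
      aLoop2_none (fun c hc col hcol => kof_none_sub (hall col hcol) hc)
    simp [resolve_date_col_py, h1, h2]
  · obtain ⟨l1, l2, hsplit, hkey, hl1, hl2⟩ := amin_some h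
    -- kr is ≤ every key present in cols
    have hmin : ∀ col ∈ cols, ∀ k, pvKof col = some k → pvLtKey k kr = false := by
      intro col hcol k hk
      rw [hsplit] at hcol
      rcases List.mem_append.1 hcol with hm1 | hm2
      · exact pvLt_asymm (hl1 col hm1 k hk)
      · rcases List.mem_cons.1 hm2 with rfl | hm2'
        · rw [hkey] at hk; cases Option.some.inj hk; exact pvLt_irrefl kr
        · exact hl2 col hm2' k hk
    rcases kof_some_cases hkey with ⟨hph, hfe⟩ | ⟨hph, hfe, hfs⟩
    · -- phase 0: exact match at candidate index kr.2
      obtain ⟨hi, hp, _⟩ := List.findIdx?_eq_some_iff_getElem.1 hfe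
      have hcr_eq : PySem.Str.lower cr = pvCand[kr.2] := by
        simpa using hp
      -- no column matches an earlier candidate exactly
      have hnone : ∀ j (hj : j < kr.2),
          cols.find? (fun col => PySem.Str.lower col == pvCand[j]'(by omega)) = none := by
        intro j hj
        apply List.find?_eq_none.2
        intro col hcol
        simp only [beq_eq_false_iff_ne, ne_eq, Bool.not_eq_true]
        intro heq
        have hfi := exact_findIdx_of_eq (by omega) heq
        have hk := kof_of_exact hfi
        have := hmin col hcol (0, j) hk
        rcases kr with ⟨k1, k2⟩
        simp only at hph; subst hph
        simp [pvLtKey] at this hj ⊢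
        omega
      -- the search at index kr.2 finds cr
      have hfind : cols.find? (fun col => PySem.Str.lower col == pvCand[kr.2]) = some cr := by
        rw [hsplit, List.find?_append]
        have hfl1 : l1.find? (fun col => PySem.Str.lower col == pvCand[kr.2]) = none := by
          apply List.find?_eq_none.2
          intro col hcol
          simp only [beq_eq_false_iff_ne, ne_eq, Bool.not_eq_true]
          intro heq
          have hk := kof_of_exact (exact_findIdx_of_eq hi heq)
          have := hl1 col hcol (0, kr.2) hk
          rcases kr with ⟨k1, k2⟩
          simp only at hph; subst hph
          rw [pvLt_irrefl] at this; cases this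
        rw [hfl1]
        simp [hcr_eq]
      have h1 : aLoop1 pvCand cols = some cr := aLoop1_first pvCand cols kr.2 cr hi hnone hfind
      simp [resolve_date_col_py, h1]
    · -- phase 1: substring match at candidate index kr.2, no exact matches anywhere
      obtain ⟨hi, hp, _⟩ := List.findIdx?_eq_some_iff_getElem.1 hfs
      have hnoexact : ∀ col ∈ cols, ∀ c ∈ pvCand, (PySem.Str.lower col == c) = false := by
        intro col hcol c hc
        simp only [beq_eq_false_iff_ne, ne_eq]
        intro heq
        rcases hfe' : List.findIdx? (fun c => PySem.Str.lower col == c) pvCand with _ | j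
        · have := List.findIdx?_eq_none_iff.1 hfe' c hc
          simp [heq] at this
        · have hk := kof_of_exact hfe'
          have := hmin col hcol (0, j) hk
          rcases kr with ⟨k1, k2⟩
          simp only at hph; subst hph
          simp [pvLtKey] at this
      have h1 : aLoop1 pvCand cols = none :=
        aLoop1_none (fun c hc col hcol => hnoexact col hcol c hc)
      -- a column's key, when the column contains some candidate, is (1, minimal index)
      have hkof_sub : ∀ col ∈ cols, ∀ j (hj : j < pvCand.length),
          PySem.Str.isIn (pvCand[j]'(by omega)) (PySem.Str.lower col) = true →
          ∃ i', i' ≤ j ∧ pvKof col = some (1, i') := by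
        intro col hcol j hj hin
        have hfe' : List.findIdx? (fun c => PySem.Str.lower col == c) pvCand = none := by
          apply List.findIdx?_eq_none_iff.2
          intro c hc; exact hnoexact col hcol c hc
        obtain ⟨i', hle, hfi⟩ := findIdx_le_of_true (p := fun c => PySem.Str.isIn c (PySem.Str.lower col)) hj hin
        exact ⟨i', hle, kof_of_sub hfe' hfi⟩
      have hnone : ∀ j (hj : j < kr.2),
          cols.find? (fun col => PySem.Str.isIn (pvCand[j]'(by omega)) (PySem.Str.lower col)) = none := by
        intro j hj
        apply List.find?_eq_none.2
        intro col hcol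
        simp only [Bool.not_eq_true]
        by_contra hcon
        simp only [Bool.not_eq_false] at hcon
        obtain ⟨i', hle, hk⟩ := hkof_sub col hcol j (by omega) hcon
        have := hmin col hcol (1, i') hk
        rcases kr with ⟨k1, k2⟩
        simp only at hph; subst hph
        simp [pvLtKey] at this hj ⊢
        omega
      have hfind : cols.find? (fun col => PySem.Str.isIn pvCand[kr.2] (PySem.Str.lower col)) = some cr := by
        rw [hsplit, List.find?_append]
        have hfl1 : l1.find? (fun col => PySem.Str.isIn pvCand[kr.2] (PySem.Str.lower col)) = none := by
          apply List.find?_eq_none.2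
          intro col hcol
          simp only [Bool.not_eq_true]
          by_contra hcon
          simp only [Bool.not_eq_false] at hcon
          obtain ⟨i', hle, hk⟩ := hkof_sub col (by rw [hsplit]; exact List.mem_append.2 (Or.inl hcol)) kr.2 hi hcon
          have := hl1 col hcol (1, i') hk
          rcases kr with ⟨k1, k2⟩
          simp only at hph; subst hph
          simp [pvLtKey] at this hle
          omega
        rw [hfl1]
        have hp' : PySem.Chars.isIn (pvCand[kr.2].toList) (PySem.Chars.lower cr.toList) = true := by
          simpa using hp
        simp [hp']
      have h2 : aLoop2 pvCand cols = some cr := aLoop2_first pvCand cols kr.2 cr hi hnone hfind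
      simp [resolve_date_col_py, h1, h2]

-- ===== VERDICT (by name: the statement is the Claim_ definition above) =====
theorem resolve_date_col_py_spec : Claim_equal_resolve_date_col_py := by
  intro cols _
  unfold Spec_resolve_date_col_py
  rw [A_eq_amin, alt_eq_amin]
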